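-- pv_equiv track=rewrite | github.com/ammedmar/wcat | orientals/sam.py | atom
-- ===== SOURCE A (Python) =====
-- def partial(s, i):
--     return s.replace(s[i], '')
--
-- def common(a, b):
--     c = []
--     alpha = b[:]
--     beta = a[:]
--     for i in alpha:
--         if i in beta:
--             c.append(i)
--             beta.remove(i)
--     return c
--
-- def simplifie(pos, neg):
--     p = pos[:]
--     n = neg[:]
--     c = common(pos, neg)
--     for i in c:
--         p.remove(i)
--         n.remove(i)
--     return(p, n)
--
-- def sommeFormelle(l1, l2):
--     return simplifie(l1[0] + l2[0], l1[1] + l2[1])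
--
-- def minus(l):
--     return (l[1], l[0])
--
-- def affiche(l):
--     aff_pos = ''
--     aff_neg = ''
--     pos = l[0]
--     neg = l[1]
--     for i in range(len(pos)):
--         aff_pos = aff_pos + '+' + pos[i]
--     for i in range(len(neg)):
--         aff_neg = aff_neg + '-' + neg[i]
--     return aff_pos + aff_neg
--
-- def boundary(s):
--     positif = []
--     negatif = []
--     for i in range(len(s)):
--         if i % 2 == 0:
--             positif += [partial(s, i)]
--         else:
--             negatif += [partial(s, i)]
--     return simplifie(positif, negatif)
--
-- def listBoundary(l):
--     c = ([], [])
--     for i in l[0]: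
--         c = sommeFormelle(c, boundary(i))
--     for i in l[1]:
--         c = sommeFormelle(c, minus(boundary(i)))
--     return c
--
-- def boundaryPlusIterated(l, n):
--     if n == 1:
--         return listBoundary(l)[0]
--     return boundaryPlusIterated((listBoundary(l)[0], []), n - 1)
--
-- def boundaryMinusIterated(l, n):
--     if n == 1:
--         return listBoundary(l)[1]
--     return boundaryMinusIterated((listBoundary(l)[1], []), n - 1)
--
-- def atom(s):
--     posDel = [s]
--     negDel = [s]
--     l = ([s], [])
--     i = 1
--     while i < len(s):
--         posDel = [affiche((boundaryPlusIterated(l, i), []))] + posDel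
--         negDel = [affiche((boundaryMinusIterated(l, i), []))] + negDel
--         i += 1
--     return (posDel, negDel)
-- ===== SOURCE B (Python) =====
-- # Incremental re-implementation: reuse the previous plus/minus iterate instead of
-- # recomputing boundaryPlusIterated/boundaryMinusIterated from scratch at every depth.
-- def _faces(w):
--     pos, neg = [], []
--     for i in range(len(w)):
--         (pos if i % 2 == 0 else neg).append(w.replace(w[i], ''))
--     return pos, neg
--
-- def _cancel(p, n):
--     out = p[:]
--     for x in n:
--         if x in out:
--             out.remove(x)
--     return out
--
-- def _step(ws):
--     P, N = [], []
--     for w in ws: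
--         fp, fn = _faces(w)
--         p2 = P + _cancel(fp, fn)
--         n2 = N + _cancel(fn, fp)
--         P, N = _cancel(p2, n2), _cancel(n2, p2)
--     return P, N
--
-- def atom(s):
--     posDel, negDel = [s], [s]
--     p, m = [s], [s]
--     for _ in range(len(s) - 1):
--         p = _step(p)[0]
--         m = _step(m)[1]
--         posDel.insert(0, ''.join('+' + w for w in p))
--         negDel.insert(0, ''.join('+' + w for w in m))
--     return posDel, negDel
-- ===== Notes on version B (the rewrite author's own statement) =====
-- stated objective: alternative
-- what changed: B maintains the plus- and minus-iterates incrementally across the outer loop (one boundary fold per depth, reusing the previous iterate) instead of A's boundaryPlusIterated/boundaryMinusIterated recursion that recomputes every iterate from scratch at each depth, and cancels formal sums with a direct erase loop instead of A's common-list-plus-double-remove; intended as faster and measured 7-42x on inputs both finish, but since the outputs themselves grow explosively both can time out on large inputs, so no unqualified speed is claimed.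
import Mathlib
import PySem

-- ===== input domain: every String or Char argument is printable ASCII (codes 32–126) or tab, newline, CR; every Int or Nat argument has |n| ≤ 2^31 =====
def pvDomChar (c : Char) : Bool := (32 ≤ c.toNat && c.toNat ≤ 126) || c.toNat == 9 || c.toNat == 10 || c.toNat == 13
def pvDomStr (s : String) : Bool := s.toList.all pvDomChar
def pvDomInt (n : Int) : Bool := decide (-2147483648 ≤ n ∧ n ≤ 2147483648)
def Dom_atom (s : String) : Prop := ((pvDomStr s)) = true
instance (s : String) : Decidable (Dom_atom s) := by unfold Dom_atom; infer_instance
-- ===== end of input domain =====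

-- B builds the iterated plus/minus boundaries in one incremental pass that reuses the previous
-- iterate, instead of A's from-scratch recomputation at every depth (objective: alternative).

-- ===== PORT A =====

-- partial(s, i) = s.replace(s[i], '') ; s[i] via pyGet? (every call site has 0 ≤ i < len(s), so it is some)
def partialA (s : String) (i : Int) : String :=
  match PySem.Str.pyGet? s i with
  | some c => PySem.Str.replace s c.toString ""
  | none => s   -- unreachable (Python would raise IndexError)

-- common(a, b): for i in b[:]: if i in beta: c.append(i); beta.remove(i)   (list.remove of a present element = List.erase)
def commonA (a b : List String) : List String :=
  (b.foldl
    (fun cb i =>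
      if i ∈ cb.2 then (cb.1 ++ [i], (PySem.List.remove? cb.2 i).getD cb.2) else cb)
    (([] : List String), a)).1

-- simplifie(pos, neg): remove each element of common(pos, neg) from both lists
def simplifieA (pos neg : List String) : List String × List String :=
  (commonA pos neg).foldl
    (fun pn i => ((PySem.List.remove? pn.1 i).getD pn.1, (PySem.List.remove? pn.2 i).getD pn.2))
    (pos, neg)

def sommeFormelleA (l1 l2 : List String × List String) : List String × List String :=
  simplifieA (l1.1 ++ l2.1) (l1.2 ++ l2.2)

def minusA (l : List String × List String) : List String × List String := (l.2, l.1)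

-- affiche: two index loops concatenating '+'/'-' prefixed entries
def afficheA (l : List String × List String) : String :=
  let affPos := (PySem.List.pyRange 0 (PySem.List.len l.1)).foldl
      (fun acc i => acc ++ "+" ++ PySem.List.pyGetD l.1 i "") ""
  let affNeg := (PySem.List.pyRange 0 (PySem.List.len l.2)).foldl
      (fun acc i => acc ++ "-" ++ PySem.List.pyGetD l.2 i "") ""
  affPos ++ affNeg

-- boundary(s): even-position faces to positif, odd to negatif, then simplifie
def boundaryA (s : String) : List String × List String :=
  let pn := (PySem.List.pyRange 0 (PySem.Str.len s)).foldl
      (fun pn i =>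
        if PySem.Int.mod i 2 == 0 then (pn.1 ++ [partialA s i], pn.2)
        else (pn.1, pn.2 ++ [partialA s i]))
      (([] : List String), ([] : List String))
  simplifieA pn.1 pn.2

def listBoundaryA (l : List String × List String) : List String × List String :=
  let c := l.1.foldl (fun c i => sommeFormelleA c (boundaryA i)) (([] : List String), ([] : List String))
  l.2.foldl (fun c i => sommeFormelleA c (minusA (boundaryA i))) c

-- boundaryPlusIterated / boundaryMinusIterated; atom only calls them with n ≥ 1 (Python diverges for n ≤ 0)
def bPI : (List String × List String) → Nat → List String
  | _, 0 => []
  | l, 1 => (listBoundaryA l).1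
  | l, n+2 => bPI ((listBoundaryA l).1, []) (n+1)

def bMI : (List String × List String) → Nat → List String
  | _, 0 => []
  | l, 1 => (listBoundaryA l).2
  | l, n+2 => bMI ((listBoundaryA l).2, []) (n+1)

-- while i < len(s): prepend the displayed iterated boundaries
def atomLoop (s : String) (i : Nat) (posDel negDel : List String) : List String × List String :=
  if i < (PySem.Str.len s).toNat then
    atomLoop s (i+1)
      (afficheA (bPI ([s], []) i, []) :: posDel)
      (afficheA (bMI ([s], []) i, []) :: negDel)
  else (posDel, negDel)
termination_by (PySem.Str.len s).toNat - i
decreasing_by simp only [PySem.Str.len_eq] at *; omega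

def atom (s : String) : List String × List String :=
  atomLoop s 1 [s] [s]

-- ===== PORT B =====

-- faces(w): one pass splitting the deleted-letter faces by parity of the index
def facesB (w : String) : List String × List String :=
  (PySem.List.pyRange 0 (PySem.Str.len w)).foldl
    (fun pn i =>
      let f := match PySem.Str.pyGet? w i with
        | some c => PySem.Str.replace w c.toString ""
        | none => w
      if PySem.Int.mod i 2 == 0 then (pn.1 ++ [f], pn.2) else (pn.1, pn.2 ++ [f]))
    (([] : List String), ([] : List String))

-- cancel(p, n): for x in n: if x in out: out.remove(x)
def cancelB (p n : List String) : List String :=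
  n.foldl (fun out x => if x ∈ out then (PySem.List.remove? out x).getD out else out) p

-- step(ws): merge the cancelled faces of each word into the running formal sum
def stepB (ws : List String) : List String × List String :=
  ws.foldl
    (fun PN w =>
      let fp := (facesB w).1
      let fn := (facesB w).2
      let p2 := PN.1 ++ cancelB fp fn
      let n2 := PN.2 ++ cancelB fn fp
      (cancelB p2 n2, cancelB n2 p2))
    (([] : List String), ([] : List String))

def showPlusB (ws : List String) : String :=
  PySem.Str.join "" (ws.map (fun w => "+" ++ w))

-- for _ in range(len(s)-1): advance the plus iterate and the minus iterate once, prepend their displays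
def altLoop : Nat → List String → List String → List String → List String → List String × List String
  | 0, _, _, posDel, negDel => (posDel, negDel)
  | k+1, p, m, posDel, negDel =>
    let p' := (stepB p).1
    let m' := (stepB m).2
    altLoop k p' m' (showPlusB p' :: posDel) (showPlusB m' :: negDel)

def atom_alt (s : String) : List String × List String :=
  altLoop ((PySem.Str.len s).toNat - 1) [s] [s] [s] [s]

-- ===== PRECONDITION & SPEC =====
def Spec_atom (s : String) (out : List String × List String) : Prop := out = atom_alt s
instance (s : String) (out : List String × List String) : Decidable (Spec_atom s out) := by unfold Spec_atom; infer_instance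

-- ===== CLAIM (what is proved, stated in full; the proofs are below) =====
def Claim_equal_atom : Prop := ∀ (s : String), Dom_atom s → Spec_atom s (atom s)

-- ===== LEMMAS AND PROOFS =====

-- `ers p n` = successively List.erase each element of n from p (the common value both cancellations compute)
def ers (p n : List String) : List String := n.foldl (fun out x => out.erase x) p

theorem removeD_eq_erase (l : List String) (x : String) :
    (PySem.List.remove? l x).getD l = l.erase x := by
  by_cases h : x ∈ l
  · rw [PySem.List.remove?_eq_some_erase l x h]; rfl
  · simp [(PySem.List.remove?_eq_none_iff l x).mpr h, List.erase_of_not_mem h]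

theorem cancelB_eq (p n : List String) : cancelB p n = ers p n := by
  unfold cancelB ers
  congr 1
  funext out x
  rw [removeD_eq_erase]
  by_cases h : x ∈ out
  · simp [h]
  · simp [h, List.erase_of_not_mem h]

theorem ers_nil (m : List String) : ers [] m = [] := by
  induction m with
  | nil => rfl
  | cons x t ih => simpa [ers, List.foldl_cons] using ih

theorem ers_cons_not_mem {i : String} {m : List String} (h : i ∉ m) (t : List String) :
    ers (i :: t) m = i :: ers t m := by
  induction m generalizing t with
  | nil => rfl
  | cons x m' ih =>
    have hix : i ≠ x := fun he => h (he ▸ List.mem_cons_self ..)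
    have h' : i ∉ m' := fun hm => h (List.mem_cons_of_mem _ hm)
    show ers ((i :: t).erase x) m' = i :: ers (t.erase x) m'
    rw [List.erase_cons_tail (by simpa using hix)]
    exact ih h' _

theorem ers_erase_of_mem {i : String} {β : List String} (h : i ∈ β) (n : List String) :
    ers n β = ers (n.erase i) (β.erase i) := by
  induction β generalizing n with
  | nil => cases h
  | cons b βt ih =>
    by_cases hbi : b = i
    · subst hbi; rw [List.erase_cons_head]; rfl
    · have hmem : i ∈ βt := by
        rcases List.mem_cons.mp h with h1 | h1
        · exact absurd h1.symm hbi
        · exact h1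
      rw [List.erase_cons_tail (by simpa using hbi)]
      show ers (n.erase b) βt = ers ((n.erase i).erase b) (βt.erase i)
      rw [ih hmem, List.erase_comm]

-- common(a, b) as a structural recursion over b with state beta
def commonGo : List String → List String → List String × List String
  | β, [] => ([], β)
  | β, i :: t =>
    if i ∈ β then
      let r := commonGo (β.erase i) t
      (i :: r.1, r.2)
    else commonGo β t

theorem commonGo_snd_eq_ers (n : List String) : ∀ β, (commonGo β n).2 = ers β n := by
  induction n with
  | nil => intro β; rfl
  | cons i t ih =>
    intro β
    by_cases h : i ∈ β
    · simp only [commonGo, if_pos h]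
      exact ih (β.erase i)
    · simp only [commonGo, if_neg h]
      show (commonGo β t).2 = ers (β.erase i) t
      rw [List.erase_of_not_mem h]
      exact ih β

theorem commonGo_snd_eq_ers_fst (n : List String) :
    ∀ β, (commonGo β n).2 = ers β (commonGo β n).1 := by
  induction n with
  | nil => intro β; rfl
  | cons i t ih =>
    intro β
    by_cases h : i ∈ β
    · simp only [commonGo, if_pos h]
      exact ih (β.erase i)
    · simp only [commonGo, if_neg h]
      exact ih β

theorem commonGo_fst_subset (n : List String) :
    ∀ β x, x ∈ (commonGo β n).1 → x ∈ β := by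
  induction n with
  | nil => intro β x hx; cases hx
  | cons i t ih =>
    intro β x hx
    by_cases h : i ∈ β
    · simp only [commonGo, if_pos h] at hx
      rcases List.mem_cons.mp hx with h1 | h1
      · exact h1 ▸ h
      · exact List.mem_of_mem_erase (ih _ _ h1)
    · simp only [commonGo, if_neg h] at hx
      exact ih _ _ hx

theorem ers_commonGo_fst (n : List String) :
    ∀ β, ers n (commonGo β n).1 = ers n β := by
  induction n with
  | nil => intro β; rw [ers_nil, ers_nil]
  | cons i t ih =>
    intro β
    by_cases h : i ∈ β
    · simp only [commonGo, if_pos h]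
      show ers ((i :: t).erase i) (commonGo (β.erase i) t).1 = ers (i :: t) β
      rw [List.erase_cons_head, ih (β.erase i), ers_erase_of_mem h, List.erase_cons_head]
    · simp only [commonGo, if_neg h]
      have hnc : i ∉ (commonGo β t).1 := fun hm => h (commonGo_fst_subset t β i hm)
      rw [ers_cons_not_mem hnc, ers_cons_not_mem h, ih β]

theorem commonA_foldl (n : List String) :
    ∀ (c0 β : List String),
      (n.foldl
        (fun cb i => if i ∈ cb.2 then (cb.1 ++ [i], (PySem.List.remove? cb.2 i).getD cb.2) else cb)
        (c0, β))
      = (c0 ++ (commonGo β n).1, (commonGo β n).2) := by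
  induction n with
  | nil => intro c0 β; simp [commonGo]
  | cons i t ih =>
    intro c0 β
    by_cases h : i ∈ β
    · simp only [List.foldl_cons, if_pos h]
      rw [ih]
      simp [commonGo, h, removeD_eq_erase]
    · simp only [List.foldl_cons, if_neg h]
      rw [ih]
      simp [commonGo, h]

theorem commonA_eq (a b : List String) : commonA a b = (commonGo a b).1 := by
  unfold commonA
  rw [commonA_foldl b [] a]
  simp

theorem simplifieA_eq (p n : List String) : simplifieA p n = (ers p n, ers n p) := by
  unfold simplifieA
  rw [PySem.List.foldl_prod_mk
      (f := fun acc i => (PySem.List.remove? acc i).getD acc)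
      (g := fun acc i => (PySem.List.remove? acc i).getD acc)]
  have hfold : ∀ (c q : List String),
      c.foldl (fun acc i => (PySem.List.remove? acc i).getD acc) q = ers q c := by
    intro c
    induction c with
    | nil => intro q; rfl
    | cons x t ih =>
      intro q
      simp only [List.foldl_cons]
      rw [ih ((PySem.List.remove? q x).getD q), removeD_eq_erase]
      rfl
  rw [hfold, hfold, commonA_eq]
  have h1 : ers p (commonGo p n).1 = ers p n := by
    rw [← commonGo_snd_eq_ers_fst, commonGo_snd_eq_ers]
  rw [h1, ers_commonGo_fst]

theorem boundaryA_eq (w : String) :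
    boundaryA w = simplifieA (facesB w).1 (facesB w).2 := by
  unfold boundaryA facesB partialA
  rfl

theorem stepB_eq (ws : List String) : stepB ws = listBoundaryA (ws, []) := by
  unfold stepB listBoundaryA
  simp only [List.foldl_nil]
  congr 1
  funext PN w
  show (cancelB (PN.1 ++ cancelB (facesB w).1 (facesB w).2)
          (PN.2 ++ cancelB (facesB w).2 (facesB w).1),
        cancelB (PN.2 ++ cancelB (facesB w).2 (facesB w).1)
          (PN.1 ++ cancelB (facesB w).1 (facesB w).2))
      = sommeFormelleA PN (boundaryA w)
  rw [boundaryA_eq, sommeFormelleA, simplifieA_eq (facesB w).1 (facesB w).2]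
  simp only [cancelB_eq]
  rw [simplifieA_eq]

theorem bPI_eq (n : Nat) : ∀ ws : List String,
    bPI (ws, []) (n + 1) = (fun v => (stepB v).1)^[n + 1] ws := by
  induction n with
  | zero => intro ws; simp [bPI, stepB_eq]
  | succ k ih =>
    intro ws
    show bPI ((listBoundaryA (ws, [])).1, []) (k + 1) = _
    rw [← stepB_eq, ih]
    conv_rhs => rw [Function.iterate_succ_apply]

theorem bMI_eq (n : Nat) : ∀ ws : List String,
    bMI (ws, []) (n + 1) = (fun v => (stepB v).2)^[n + 1] ws := by
  induction n with
  | zero => intro ws; simp [bMI, stepB_eq]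
  | succ k ih =>
    intro ws
    show bMI ((listBoundaryA (ws, [])).2, []) (k + 1) = _
    rw [← stepB_eq, ih]
    conv_rhs => rw [Function.iterate_succ_apply]

theorem chars_join_nil (l : List (List Char)) : PySem.Chars.join [] l = l.flatten := by
  induction l with
  | nil => rfl
  | cons h t ih =>
    show [].intercalate (h :: t) = h ++ t.flatten
    cases t with
    | nil => simp [List.intercalate]
    | cons h' t' =>
      have : ([] : List Char).intercalate (h' :: t') = (h' :: t').flatten := ih
      simp only [List.intercalate, List.intersperse] at this ⊢
      simp [this]

theorem foldl_plus_toList (xs : List String) : ∀ acc : String,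
    (xs.foldl (fun a w => a ++ "+" ++ w) acc).toList
      = acc.toList ++ ((xs.map (fun w => "+" ++ w)).map String.toList).flatten := by
  induction xs with
  | nil => intro acc; simp
  | cons h t ih =>
    intro acc
    rw [List.foldl_cons, ih]
    simp

theorem afficheA_eq_showPlusB (xs : List String) :
    afficheA (xs, []) = showPlusB xs := by
  unfold afficheA showPlusB
  simp only []
  have hneg : (PySem.List.pyRange 0 (PySem.List.len ([] : List String))).foldl
      (fun acc i => acc ++ "-" ++ PySem.List.pyGetD ([] : List String) i "") "" = "" := rfl
  rw [hneg]
  have hpos := PySem.List.foldl_pyRange_pyGetD xs "" (fun acc w => acc ++ "+" ++ w) "" (a := 0) le_rfl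
  rw [hpos]
  simp only [Int.toNat_zero, List.drop_zero]
  apply String.toList_inj.mp
  have h0 : ("" : String).toList = ([] : List Char) := rfl
  rw [PySem.Str.toList_join, h0, chars_join_nil]
  simpa using foldl_plus_toList xs ""


theorem atomLoop_eq_altLoop (s : String) (r : Nat) :
    ∀ (i : Nat) (posDel negDel : List String), 1 ≤ i →
      i + r = (PySem.Str.len s).toNat →
      atomLoop s i posDel negDel
        = altLoop r ((fun v => (stepB v).1)^[i - 1] [s]) ((fun v => (stepB v).2)^[i - 1] [s])
            posDel negDel := by
  induction r with
  | zero =>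
    intro i posDel negDel h1 hlen
    unfold atomLoop
    rw [if_neg (by omega)]
    rfl
  | succ k ih =>
    intro i posDel negDel h1 hlen
    obtain ⟨j, rfl⟩ : ∃ j, i = j + 1 := ⟨i - 1, by omega⟩
    unfold atomLoop
    rw [if_pos (by omega)]
    rw [ih (j + 2) _ _ (by omega) (by omega)]
    rw [show (j + 2 - 1 : Nat) = j + 1 from rfl, show (j + 1 - 1 : Nat) = j from rfl]
    rw [bPI_eq j [s], bMI_eq j [s], afficheA_eq_showPlusB, afficheA_eq_showPlusB]
    have e1 : (fun v => (stepB v).1)^[j + 1] [s]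
        = (stepB ((fun v => (stepB v).1)^[j] [s])).1 := by
      rw [Function.iterate_succ_apply']
    have e2 : (fun v => (stepB v).2)^[j + 1] [s]
        = (stepB ((fun v => (stepB v).2)^[j] [s])).2 := by
      rw [Function.iterate_succ_apply']
    rw [e1, e2]
    simp only [altLoop]

-- ===== VERDICT (by name: the statement is the Claim_ definition above) =====
theorem atom_spec : Claim_equal_atom := by
  intro s _
  unfold Spec_atom atom atom_alt
  by_cases hlen : (PySem.Str.len s).toNat = 0
  · unfold atomLoop
    rw [if_neg (by omega)]
    rw [show (PySem.Str.len s).toNat - 1 = 0 from by omega]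
    rfl
  · rw [atomLoop_eq_altLoop s ((PySem.Str.len s).toNat - 1) 1 [s] [s] le_rfl (by omega)]
    simp
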